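-- pv_equiv track=rewrite | github.com/justin830827/I-WANT-TO-FIND-A-JOB | Algorithms/Binary Search/python/count_negatives.py | search
-- ===== SOURCE A (Python) =====
-- def search(arr):
--     """
--     Args:
--         arr: a sorted arr with postive and negative numbers.
--
--     Returns:
--         Return the leftmost index of negetive numbers in arr.
--
--     Time Complexity: O(log(n))
--     Space Complexity: O(1)
--
--     """
--     left, right = 0, len(arr)
--     while left < right:
--         pivot = left + (right - left) // 2
--         if arr[pivot] < 0:
--             right = pivot
--         else:
--             left = pivot + 1
--     return left
-- ===== SOURCE B (Python) =====
-- def search(arr):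
--     # Binary boundary search by structural recursion on list slices:
--     # keep the current candidate sub-list and the absolute offset of its start.
--     def go(sub, base):
--         if not sub:
--             return base
--         mid = len(sub) // 2
--         if sub[mid] < 0:
--             return go(sub[:mid], base)
--         return go(sub[mid + 1:], base + mid + 1)
--     return go(arr, 0)
-- ===== Notes on version B (the rewrite author's own statement) =====
-- stated objective: alternative
-- what changed: A's index-pair while loop (mutable left/right over the whole array) is replaced by structural recursion on list slices: a helper go(sub, base) that halves the current sub-list itself and carries the absolute offset of its start.
import Mathlib
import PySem

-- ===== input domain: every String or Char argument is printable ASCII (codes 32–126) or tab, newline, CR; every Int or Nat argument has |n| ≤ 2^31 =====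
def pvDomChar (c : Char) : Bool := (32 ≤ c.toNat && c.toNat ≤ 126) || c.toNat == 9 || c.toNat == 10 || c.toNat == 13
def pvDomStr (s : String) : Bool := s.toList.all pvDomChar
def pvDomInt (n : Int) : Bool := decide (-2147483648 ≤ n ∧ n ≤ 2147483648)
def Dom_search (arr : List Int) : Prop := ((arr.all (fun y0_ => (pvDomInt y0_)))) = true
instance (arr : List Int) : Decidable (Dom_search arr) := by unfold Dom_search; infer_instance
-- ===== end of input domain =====

-- B replaces A's index-pair while loop by structural recursion on list slices (objective: alternative).

-- ===== PORT A =====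
-- port of A's while-loop: state (left, right), loop while left < right, then return left.
-- arr[pivot]: pivot is always a valid non-negative index here (0 ≤ left ≤ pivot < right ≤ arr.length
-- throughout the loop), so Python's arr[pivot] is exactly arr.getD pivot 0.
def searchLoop (arr : List Int) (left right : Nat) : Nat :=
  if left < right then
    let pivot := left + (right - left) / 2
    if arr.getD pivot 0 < 0 then
      searchLoop arr left pivot
    else
      searchLoop arr (pivot + 1) right
  else left
termination_by right - left
decreasing_by all_goals omega

def search (arr : List Int) : Int := (searchLoop arr 0 arr.length : Int)

-- ===== PORT B =====
-- port of Source B's go(sub, base): recursion on the current sub-list plus its absolute start offset.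
-- sub[:mid] and sub[mid+1:] with 0 ≤ mid < len(sub) are exactly List.take mid / List.drop (mid+1);
-- sub[mid] with 0 ≤ mid < len(sub) is exactly sub.getD mid 0.
def searchGo (sub : List Int) (base : Nat) : Nat :=
  if sub = [] then base
  else
    let mid := sub.length / 2
    if sub.getD mid 0 < 0 then searchGo (sub.take mid) base
    else searchGo (sub.drop (mid + 1)) (base + mid + 1)
termination_by sub.length
decreasing_by
  · have : 0 < sub.length := List.length_pos_iff.mpr (by assumption)
    have := Nat.div_lt_self this one_lt_two
    simp [List.length_take]; omega
  · have : 0 < sub.length := List.length_pos_iff.mpr (by assumption)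
    simp [List.length_drop]; omega

def search_alt (arr : List Int) : Int := (searchGo arr 0 : Int)

-- ===== PRECONDITION & SPEC =====
def Spec_search (arr : List Int) (out : Int) : Prop := out = search_alt arr
instance (arr : List Int) (out : Int) : Decidable (Spec_search arr out) := by unfold Spec_search; infer_instance

-- ===== CLAIM (what is proved, stated in full; the proofs are below) =====
def Claim_equal_search : Prop := ∀ (arr : List Int), Dom_search arr → Spec_search arr (search arr)

-- ===== LEMMAS AND PROOFS =====

-- On the window [left, right) with right ≤ arr.length, B's slice recursion started at
-- (arr[left:right], left) computes exactly A's loop on (left, right).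
-- The window [l, r) of arr, as B's slice recursion sees it.
def win (arr : List Int) (l r : Nat) : List Int := (arr.drop l).take (r - l)

theorem win_length (arr : List Int) (l r : Nat) (hr : r ≤ arr.length) (hlr : l ≤ r) :
    (win arr l r).length = r - l := by
  simp [win]; omega

theorem win_getD (arr : List Int) (l r m : Nat) (hm : m < r - l) :
    (win arr l r).getD m 0 = arr.getD (l + m) 0 := by
  simp only [win, List.getD_eq_getElem?_getD, List.getElem?_take_of_lt hm, List.getElem?_drop]

theorem win_take (arr : List Int) (l r m : Nat) (hm : m ≤ r - l) :
    (win arr l r).take m = win arr l (l + m) := by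
  simp [win, List.take_take]; omega

theorem win_drop (arr : List Int) (l r m : Nat) :
    (win arr l r).drop m = win arr (l + m) r := by
  simp only [win, List.drop_take, List.drop_drop]
  congr 1
  omega

theorem searchGo_eq_searchLoop (arr : List Int) (left right : Nat) :
    right ≤ arr.length → left ≤ right →
    searchGo (win arr left right) left = searchLoop arr left right := by
  fun_induction searchLoop arr left right with
  | case1 l r h pivot hneg ih =>
      intro hr hlr
      rw [searchGo]
      have hne : win arr l r ≠ [] := by
        intro he
        have := win_length arr l r hr hlr
        rw [he] at this
        simp at this; omega
      rw [if_neg hne]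
      have hlen : (win arr l r).length = r - l := win_length arr l r hr hlr
      have hmid : (win arr l r).length / 2 = pivot - l := by rw [hlen]; omega
      have hmlt : pivot - l < r - l := by omega
      have hget : (win arr l r).getD (pivot - l) 0 = arr.getD pivot 0 := by
        rw [win_getD arr l r _ hmlt]
        congr 1; omega
      simp only [hmid]
      rw [hget, if_pos hneg]
      rw [win_take arr l r _ (le_of_lt hmlt)]
      have hlp : l + (pivot - l) = pivot := by omega
      rw [hlp]
      exact ih (by omega) (by omega)
  | case2 l r h pivot hneg ih =>
      intro hr hlr
      rw [searchGo]
      have hne : win arr l r ≠ [] := by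
        intro he
        have := win_length arr l r hr hlr
        rw [he] at this
        simp at this; omega
      rw [if_neg hne]
      have hlen : (win arr l r).length = r - l := win_length arr l r hr hlr
      have hmid : (win arr l r).length / 2 = pivot - l := by rw [hlen]; omega
      have hmlt : pivot - l < r - l := by omega
      have hget : (win arr l r).getD (pivot - l) 0 = arr.getD pivot 0 := by
        rw [win_getD arr l r _ hmlt]
        congr 1; omega
      simp only [hmid]
      rw [hget, if_neg hneg]
      rw [win_drop arr l r (pivot - l + 1)]
      have hlp : l + (pivot - l + 1) = pivot + 1 := by omega
      have hbase : l + (pivot - l) + 1 = pivot + 1 := by omega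
      rw [hlp, hbase]
      exact ih hr (by omega)
  | case3 l r h =>
      intro _ hlr
      rw [searchGo]
      have : r - l = 0 := by omega
      simp [win, this]

-- ===== VERDICT (by name: the statement is the Claim_ definition above) =====
theorem search_spec : Claim_equal_search := by
  intro arr _
  unfold Spec_search search search_alt
  have := searchGo_eq_searchLoop arr 0 arr.length (le_refl _) (Nat.zero_le _)
  simp only [win, List.drop_zero, Nat.sub_zero, List.take_length] at this
  rw [this]
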